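-- pv_equiv track=rewrite | github.com/KirbysGit/taylor.io | backend/generator/builders/tagline.py | _tagline_outer_italic_segments
-- ===== SOURCE A (Python) =====
-- from typing import Any, Dict, List, Tuple
--
-- def _tagline_outer_italic_segments(raw: str) -> List[Tuple[bool, str]]:
--     """
--     Scan ``raw`` left-to-right and emit (is_italic, segment) pieces using ``_..._`` pairs.
--
--     - Balanced ``_inner_`` → ``inner`` is one segment with ``is_italic=True``.
--     - Lone/trailing ``_`` → consume until next ``_`` or EOS as a non-italic segment (literal underscores preserved in the slice).
--     - Segments between italic spans are non-italic; bold/interpunct rules apply later per segment.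
--     """
--     out: List[Tuple[bool, str]] = []
--     i = 0
--     n = len(raw)
--     while i < n:
--         if raw[i] == "_":
--             j = raw.find("_", i + 1)
--             if j != -1 and j > i + 1:
--                 out.append((True, raw[i + 1 : j]))
--                 i = j + 1
--             else:
--                 start = i
--                 i += 1
--                 while i < n and raw[i] != "_":
--                     i += 1
--                 out.append((False, raw[start:i]))
--         else:
--             start = i
--             while i < n and raw[i] != "_":
--                 i += 1
--             out.append((False, raw[start:i]))
--     return out
-- ===== SOURCE B (Python) =====
-- from typing import List, Tuple
--
-- def _tagline_outer_italic_segments(raw: str) -> List[Tuple[bool, str]]: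
--     """Split on the separator once, then run a two-state machine over the parts.
--
--     ``under`` says whether the current part was preceded by a separator.
--     A part in ``under`` mode that is non-empty and not the last one is a
--     balanced italic span; otherwise the opening separator is literal and
--     stays glued to the part as a non-italic segment.
--     """
--     parts = raw.split("_")
--     out: List[Tuple[bool, str]] = []
--     under = False
--     k = len(parts)
--     for t, p in enumerate(parts):
--         if not under:
--             if p:
--                 out.append((False, p))
--             under = True
--         elif p and t + 1 < k:
--             out.append((True, p))
--             under = False
--         else:
--             out.append((False, "_" + p))
--     return out
-- ===== Notes on version B (the rewrite author's own statement) =====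
-- stated objective: alternative
-- what changed: A scans characters by index with raw.find and nested while-loops; B splits the string once and runs a two-state (plain/after-separator) machine over the parts list, so no index arithmetic or inner character scans remain.
import Mathlib
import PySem

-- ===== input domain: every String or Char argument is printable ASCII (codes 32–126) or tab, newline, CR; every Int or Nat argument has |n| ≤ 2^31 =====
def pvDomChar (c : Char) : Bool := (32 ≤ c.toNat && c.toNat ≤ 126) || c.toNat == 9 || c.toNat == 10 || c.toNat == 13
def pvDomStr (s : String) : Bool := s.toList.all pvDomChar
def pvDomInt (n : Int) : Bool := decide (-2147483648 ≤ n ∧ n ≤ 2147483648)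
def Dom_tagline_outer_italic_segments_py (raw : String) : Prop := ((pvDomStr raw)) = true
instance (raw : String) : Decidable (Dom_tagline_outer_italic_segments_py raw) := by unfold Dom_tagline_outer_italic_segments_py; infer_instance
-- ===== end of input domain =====

-- B replaces A's index-based scan (find/while over character positions) by a single split on
-- "_" followed by a two-state machine over the resulting parts list (objective: alternative).


-- ===== PORT A =====
def pvAdvA (cs : List Char) (n i : Nat) : Nat :=
  if h : i < n ∧ cs[i]? ≠ some '_' then pvAdvA cs n (i + 1) else i
termination_by n - i
decreasing_by omega

theorem pvAdvA_ge (cs : List Char) (n i : Nat) : i ≤ pvAdvA cs n i := by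
  unfold pvAdvA
  split
  · exact le_trans (by omega) (pvAdvA_ge cs n (i + 1))
  · exact le_refl i
termination_by n - i
decreasing_by omega

def pvLoopA (cs : List Char) (n : Nat) (out : List (Bool × String)) (i : Nat) :
    List (Bool × String) :=
  if _h : i < n then
    if cs[i]? = some '_' then
      let j := PySem.Chars.findFrom cs ['_'] ((i : Int) + 1) none
      if hj : j ≠ -1 ∧ (i : Int) + 1 < j then
        pvLoopA cs n
          (out ++ [(true, String.ofList (PySem.Chars.slice cs (some ((i : Int) + 1)) (some j)))])
          (j.toNat + 1)
      else
        let i' := pvAdvA cs n (i + 1)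
        pvLoopA cs n
          (out ++ [(false, String.ofList (PySem.Chars.slice cs (some (i : Int)) (some (i' : Int))))])
          i'
    else
      let i' := pvAdvA cs n i
      pvLoopA cs n
        (out ++ [(false, String.ofList (PySem.Chars.slice cs (some (i : Int)) (some (i' : Int))))])
        i'
  else out
termination_by n - i
decreasing_by
  · have := hj.2; omega
  · have := pvAdvA_ge cs n (i + 1); omega
  · have h1 : i < pvAdvA cs n i := by
      rw [pvAdvA]; simp only [*, ne_eq, not_false_iff, and_true, dif_pos]
      · exact lt_of_lt_of_le (by omega) (pvAdvA_ge cs n (i + 1))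
    omega

def tagline_outer_italic_segments_py (raw : String) : List (Bool × String) :=
  pvLoopA raw.toList raw.toList.length [] 0

-- ===== PORT B =====
def pvStepB (k : Int) (st : List (Bool × String) × Bool) (tp : Int × List Char) :
    List (Bool × String) × Bool :=
  if st.2 = false then
    ((if tp.2 ≠ [] then st.1 ++ [(false, String.ofList tp.2)] else st.1), true)
  else if tp.2 ≠ [] ∧ tp.1 + 1 < k then
    (st.1 ++ [(true, String.ofList tp.2)], false)
  else
    (st.1 ++ [(false, String.ofList ('_' :: tp.2))], st.2)

def tagline_outer_italic_segments_py_alt (raw : String) : List (Bool × String) :=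
  let parts := PySem.Chars.splitOn raw.toList ['_']
  (List.foldl (pvStepB (parts.length : Int)) ([], false) (PySem.List.enumerate parts)).1

-- ===== PRECONDITION & SPEC =====
def Spec_tagline_outer_italic_segments_py (raw : String) (out : List (Bool × String)) : Prop := out = tagline_outer_italic_segments_py_alt raw
instance (raw : String) (out : List (Bool × String)) : Decidable (Spec_tagline_outer_italic_segments_py raw out) := by unfold Spec_tagline_outer_italic_segments_py; infer_instance

-- ===== CLAIM (what is proved, stated in full; the proofs are below) =====
def Claim_equal_tagline_outer_italic_segments_py : Prop := ∀ (raw : String), Dom_tagline_outer_italic_segments_py raw → Spec_tagline_outer_italic_segments_py raw (tagline_outer_italic_segments_py raw)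

-- ===== LEMMAS AND PROOFS =====

-- the common specification both loops are proved equal to:
-- left-to-right segmentation by recursion on the character list
def pvF : List Char → List (Bool × String)
  | [] => []
  | c :: t =>
    if c = '_' then
      let inner := t.takeWhile (· ≠ '_')
      let rest := t.dropWhile (· ≠ '_')
      if rest ≠ [] ∧ inner ≠ [] then (true, String.ofList inner) :: pvF rest.tail
      else (false, String.ofList ('_' :: inner)) :: pvF rest
    else
      (false, String.ofList (c :: t.takeWhile (· ≠ '_'))) :: pvF (t.dropWhile (· ≠ '_'))
termination_by l => l.length
decreasing_by all_goals
  (have h := List.Sublist.length_le (List.dropWhile_sublist (l := t) (p := fun x => decide (x ≠ '_')))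
   simp only [List.length_cons, List.length_tail]
   omega)

def pvSplit : List Char → List (List Char)
  | [] => [[]]
  | c :: t =>
    if c = '_' then [] :: pvSplit t
    else (c :: (pvSplit t).headI) :: (pvSplit t).tail

theorem pvSplit_ne_nil (s : List Char) : pvSplit s ≠ [] := by
  cases s with
  | nil => simp [pvSplit]
  | cons c t => by_cases h : c = '_' <;> simp [pvSplit, h]

theorem pvSplit_char (s : List Char) :
    pvSplit s = (s.takeWhile (· ≠ '_')) ::
      (match s.dropWhile (· ≠ '_') with
       | [] => []
       | _ :: t2 => pvSplit t2) := by
  induction s with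
  | nil => simp [pvSplit]
  | cons c t ih =>
    by_cases hc : c = '_'
    · subst hc; simp [pvSplit]
    · simp only [pvSplit, ih, List.takeWhile_cons, List.dropWhile_cons, hc,
        ne_eq, if_false, decide_not, Bool.not_false, decide_false, List.headI, List.tail,
        if_true]

def pvConsHead (x : List Char) : List (List Char) → List (List Char)
  | [] => [x]
  | p :: ps => (x ++ p) :: ps

theorem pvSplitOn_go_eq (fuel : Nat) (l cur : List Char) (acc : List (List Char))
    (h : l.length ≤ fuel) :
    PySem.Chars.splitOn.go ['_'] fuel l cur acc = acc.reverse ++ pvConsHead cur.reverse (pvSplit l) := by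
  induction fuel generalizing l cur acc with
  | zero =>
    have : l = [] := by cases l <;> simp_all
    subst this
    simp [PySem.Chars.splitOn.go, pvSplit, pvConsHead]
  | succ fuel ih =>
    cases l with
    | nil => simp [PySem.Chars.splitOn.go, pvSplit, pvConsHead]
    | cons c rest =>
      by_cases hc : c = '_'
      · subst hc
        rw [PySem.Chars.splitOn.go]
        simp only [List.isPrefixOf, BEq.rfl, Bool.true_and, if_pos]
        simp only [List.length_singleton, List.drop_succ_cons, List.drop_zero]
        rw [ih rest [] (cur.reverse :: acc) (by simpa using h)]
        obtain ⟨p, ps, hp⟩ : ∃ p ps, pvSplit rest = p :: ps := by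
          cases hps : pvSplit rest with
          | nil => exact absurd hps (pvSplit_ne_nil rest)
          | cons p ps => exact ⟨p, ps, rfl⟩
        simp [pvSplit, pvConsHead, hp]
      · rw [PySem.Chars.splitOn.go]
        have hpre : ['_'].isPrefixOf (c :: rest) = false := by
          simp [List.isPrefixOf]; exact fun h => absurd h.symm hc
        rw [if_neg (by simp [hpre])]
        rw [ih rest (c :: cur) acc (by simpa using h)]
        obtain ⟨p, ps, hp⟩ : ∃ p ps, pvSplit rest = p :: ps := by
          cases hps : pvSplit rest with
          | nil => exact absurd hps (pvSplit_ne_nil rest)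
          | cons p ps => exact ⟨p, ps, rfl⟩
        simp [pvSplit, pvConsHead, hp, hc]

theorem pvSplitOn_eq (s : List Char) : PySem.Chars.splitOn s ['_'] = pvSplit s := by
  rw [PySem.Chars.splitOn, pvSplitOn_go_eq s.length.succ s [] [] (by omega)]
  obtain ⟨p, ps, hp⟩ : ∃ p ps, pvSplit s = p :: ps := by
    cases hps : pvSplit s with
    | nil => exact absurd hps (pvSplit_ne_nil s)
    | cons p ps => exact ⟨p, ps, rfl⟩
  simp [pvConsHead, hp]

theorem pvAdvA_eq (cs : List Char) (i : Nat) :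
    pvAdvA cs cs.length i = i + ((cs.drop i).takeWhile (· ≠ '_')).length := by
  rw [pvAdvA]
  split
  · rename_i h
    obtain ⟨h1, h2⟩ := h
    rw [pvAdvA_eq cs (i + 1)]
    have hne : cs[i] ≠ '_' := by
      intro hh; exact h2 (by simp [List.getElem?_eq_getElem h1, hh])
    have hTW : (cs.drop i).takeWhile (fun x => decide (x ≠ '_')) =
        cs[i] :: (cs.drop (i + 1)).takeWhile (fun x => decide (x ≠ '_')) := by
      rw [List.drop_eq_getElem_cons h1, List.takeWhile_cons_of_pos (by simp [hne])]
    simp only [hTW, List.length_cons]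
    omega
  · rename_i h
    rcases not_and_or.mp h with h1 | h2
    · have : cs.drop i = [] := List.drop_eq_nil_of_le (by omega)
      simp [this]
    · have heq : cs[i]? = some '_' := not_not.mp h2
      have h1 : i < cs.length := by
        by_contra hge
        rw [List.getElem?_eq_none_iff.mpr (by omega)] at heq
        simp at heq
      have hchar : cs[i] = '_' := by
        rw [List.getElem?_eq_getElem h1] at heq
        injection heq
      rw [List.drop_eq_getElem_cons h1, List.takeWhile_cons_of_neg (by simp [hchar])]
      simp
termination_by cs.length - i
decreasing_by omega

theorem pvFindGo_eq (l : List Char) (k : Nat) :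
    PySem.Chars.find.go ['_'] l k =
      if '_' ∈ l then ((k + (l.takeWhile (· ≠ '_')).length : Nat) : Int) else -1 := by
  induction l generalizing k with
  | nil => simp [PySem.Chars.find.go]
  | cons c t ih =>
    by_cases hc : c = '_'
    · subst hc
      rw [PySem.Chars.find.go]
      simp [List.isPrefixOf]
    · rw [PySem.Chars.find.go]
      have hpre : ['_'].isPrefixOf (c :: t) = false := by
        simp [List.isPrefixOf]; exact fun h => absurd h.symm hc
      rw [if_neg (by simp [hpre]), ih (k + 1)]
      simp only [List.mem_cons, List.takeWhile_cons, hc, ne_eq, not_false_iff, decide_true]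
      have : ¬ ('_' = c) := fun h => absurd h.symm hc
      split_ifs with h1 h2 h2 <;> (simp_all; try omega)

theorem pvFind_eq (l : List Char) :
    PySem.Chars.find l ['_'] =
      if '_' ∈ l then (((l.takeWhile (· ≠ '_')).length : Nat) : Int) else -1 := by
  rw [PySem.Chars.find, pvFindGo_eq]; simp

theorem pvTake_takeWhile (p : Char → Bool) (l : List Char) :
    l.take (l.takeWhile p).length = l.takeWhile p := by
  induction l with
  | nil => simp
  | cons c t ih => by_cases h : p c <;> simp [h, ih]

theorem pvDrop_takeWhile (p : Char → Bool) (l : List Char) :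
    l.drop (l.takeWhile p).length = l.dropWhile p := by
  induction l with
  | nil => simp
  | cons c t ih => by_cases h : p c <;> simp [h, ih]

theorem pvLoopA_eq (cs : List Char) (i : Nat) (out : List (Bool × String)) :
    pvLoopA cs cs.length out i = out ++ pvF (cs.drop i) := by
  rw [pvLoopA]
  split
  case isFalse h =>
    have : cs.drop i = [] := List.drop_eq_nil_of_le (by omega)
    simp [this, pvF]
  case isTrue h1 =>
    have hdrop : cs.drop i = cs[i] :: cs.drop (i + 1) := List.drop_eq_getElem_cons h1
    split
    case isTrue hu =>
      have hchar : cs[i] = '_' := by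
        rw [List.getElem?_eq_getElem h1] at hu; injection hu
      -- j = findFrom cs "_" (i+1)
      have hcast : ((i : Int) + 1) = ((i + 1 : Nat) : Int) := by push_cast; ring
      have hff : PySem.Chars.findFrom cs ['_'] ((i : Int) + 1) none =
          if PySem.Chars.find (cs.drop (i + 1)) ['_'] = -1 then -1
          else ((i + 1 : Nat) : Int) + PySem.Chars.find (cs.drop (i + 1)) ['_'] := by
        rw [hcast]; exact PySem.Chars.findFrom_natCast cs ['_'] (i + 1) (by omega)
      set t := cs.drop (i + 1) with ht
      set m := (t.takeWhile (· ≠ '_')).length with hm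
      by_cases hmem : '_' ∈ t
      · have hfind : PySem.Chars.find t ['_'] = (m : Int) := by rw [pvFind_eq, if_pos hmem]
        have hj : PySem.Chars.findFrom cs ['_'] ((i : Int) + 1) none = ((i + 1 + m : Nat) : Int) := by
          rw [hff, hfind]; rw [if_neg (by omega)]; push_cast; ring
        by_cases hm0 : 0 < m
        · rw [dif_pos (by rw [hj]; constructor <;> [omega; (push_cast; omega)])]
          have hslice : PySem.Chars.slice cs (some ((i : Int) + 1))
              (some (PySem.Chars.findFrom cs ['_'] ((i : Int) + 1) none)) = t.takeWhile (· ≠ '_') := by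
            rw [hj, hcast]
            have : ((i + 1 + m : Nat) : Int) = ((i + 1 : Nat) : Int) + (m : Int) := by push_cast; ring
            rw [this, PySem.Chars.slice, PySem.List.slice_natCast_add cs (i + 1) m, ← ht, hm,
              pvTake_takeWhile]
          have htoNat : (PySem.Chars.findFrom cs ['_'] ((i : Int) + 1) none).toNat + 1 = i + m + 2 := by
            rw [hj]; omega
          rw [hslice, htoNat, pvLoopA_eq cs (i + m + 2)]
          have hdrop2 : cs.drop (i + m + 2) = (t.dropWhile (· ≠ '_')).tail := by
            rw [← pvDrop_takeWhile (· ≠ '_') t, ← hm]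
            rw [List.tail_drop, ht, List.drop_drop]
            congr 1; omega
          rw [hdrop2, hdrop, hchar]
          have hrest : t.dropWhile (· ≠ '_') ≠ [] := by
            intro hnil
            exact absurd (List.dropWhile_eq_nil_iff.mp hnil '_' hmem) (by simp)
          have hinner : t.takeWhile (· ≠ '_') ≠ [] := by
            intro hnil; rw [hnil] at hm; simp at hm; omega
          conv_rhs => rw [pvF]
          rw [if_pos rfl, if_pos ⟨hrest, hinner⟩]
          simp
        · -- m = 0 : lone underscore branch of A, inner = []
          have hm0' : m = 0 := by omega
          rw [dif_neg (by rw [hj]; push_cast; omega)]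
          have hadv : pvAdvA cs cs.length (i + 1) = i + 1 := by
            rw [pvAdvA_eq, ← ht, ← hm, hm0']
          have hslice : PySem.Chars.slice cs (some (i : Int)) (some ((i + 1 : Nat) : Int)) = ['_'] := by
            have : ((i + 1 : Nat) : Int) = ((i : Nat) : Int) + ((1 : Nat) : Int) := by push_cast; ring
            rw [this, PySem.Chars.slice, PySem.List.slice_natCast_add cs i 1, hdrop]
            simp [hchar]
          rw [hadv]
          simp only [hslice]
          rw [pvLoopA_eq cs (i + 1)]
          have htr : t.dropWhile (· ≠ '_') = t := by
            rw [← pvDrop_takeWhile (· ≠ '_') t, ← hm, hm0', List.drop_zero]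
          have hinner : t.takeWhile (· ≠ '_') = [] := by
            cases hx : t.takeWhile (· ≠ '_') with
            | nil => rfl
            | cons a b => rw [hx] at hm; simp at hm; omega
          conv_rhs => rw [hdrop, hchar, pvF]
          rw [if_pos rfl, if_neg (by intro hcon; exact hcon.2 hinner)]
          rw [hinner, htr, ← ht]
          simp
      · -- no further underscore: consume to end of string
        have hfind : PySem.Chars.find t ['_'] = -1 := by rw [pvFind_eq, if_neg hmem]
        have hj : PySem.Chars.findFrom cs ['_'] ((i : Int) + 1) none = -1 := by
          rw [hff, hfind]; simp
        rw [dif_neg (by rw [hj]; simp)]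
        have htw : t.takeWhile (· ≠ '_') = t := by
          apply List.takeWhile_eq_self_iff.mpr
          intro x hx; simp; intro hxe; exact hmem (hxe ▸ hx)
        have hlen : t.length = cs.length - (i + 1) := by rw [ht]; simp
        have hadv : pvAdvA cs cs.length (i + 1) = cs.length := by
          rw [pvAdvA_eq, ← ht, htw]; omega
        have hslice : PySem.Chars.slice cs (some (i : Int)) (some ((cs.length : Nat) : Int)) =
            '_' :: t := by
          have : ((cs.length : Nat) : Int) = ((i : Nat) : Int) + ((1 + t.length : Nat) : Int) := by
            push_cast; omega
          rw [this, PySem.Chars.slice, PySem.List.slice_natCast_add cs i (1 + t.length), hdrop, hchar]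
          exact List.take_of_length_le (by simp)
        rw [hadv]
        simp only [hslice]
        rw [pvLoopA_eq cs cs.length]
        have : cs.drop cs.length = [] := by simp
        rw [this]
        have htr : t.dropWhile (· ≠ '_') = [] := by
          rw [← pvDrop_takeWhile (· ≠ '_') t, htw]; simp
        conv_rhs => rw [hdrop, hchar, pvF]
        rw [if_pos rfl, if_neg (by intro hcon; exact hcon.1 htr)]
        rw [htr, htw, pvF]
        simp
    case isFalse hu =>
      have hchar : cs[i] ≠ '_' := by
        intro hh; exact hu (by rw [List.getElem?_eq_getElem h1, hh])
      set t := cs.drop (i + 1) with ht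
      have htw : (cs.drop i).takeWhile (· ≠ '_') = cs[i] :: t.takeWhile (· ≠ '_') := by
        rw [hdrop, List.takeWhile_cons_of_pos (by simp [hchar])]
      have hadv : pvAdvA cs cs.length i = i + 1 + (t.takeWhile (· ≠ '_')).length := by
        rw [pvAdvA_eq, htw]; simp; omega
      have hslice : PySem.Chars.slice cs (some (i : Int))
          (some ((i + 1 + (t.takeWhile (· ≠ '_')).length : Nat) : Int)) =
          cs[i] :: t.takeWhile (· ≠ '_') := by
        have : ((i + 1 + (t.takeWhile (· ≠ '_')).length : Nat) : Int) =
            ((i : Nat) : Int) + ((1 + (t.takeWhile (· ≠ '_')).length : Nat) : Int) := by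
          push_cast; ring
        rw [this, PySem.Chars.slice, PySem.List.slice_natCast_add, hdrop, Nat.add_comm 1,
          List.take_succ_cons, pvTake_takeWhile]
      rw [hadv]
      simp only [hslice]
      rw [pvLoopA_eq cs (i + 1 + (t.takeWhile (· ≠ '_')).length)]
      have hdrop3 : cs.drop (i + 1 + (t.takeWhile (· ≠ '_')).length) = t.dropWhile (· ≠ '_') := by
        rw [← pvDrop_takeWhile (· ≠ '_') t, ht, List.drop_drop]
      rw [hdrop3]
      conv_rhs => rw [hdrop, pvF]
      rw [if_neg hchar]
      simp
termination_by cs.length - i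
decreasing_by all_goals omega
theorem pvHead_dropWhile (p : Char → Bool) (l : List Char) (c : Char) (t : List Char)
    (h : l.dropWhile p = c :: t) : p c = false := by
  induction l with
  | nil => simp at h
  | cons a b ih =>
    rw [List.dropWhile_cons] at h
    split at h
    · exact ih h
    · rename_i hp; cases h; simpa using hp

-- clean recursive form of B's loop: `rest ≠ []` in place of the index test
def pvMachine : List (List Char) → List (Bool × String) → Bool → List (Bool × String)
  | [], out, _ => out
  | p :: rest, out, false =>
    pvMachine rest (if p ≠ [] then out ++ [(false, String.ofList p)] else out) true
  | p :: rest, out, true =>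
    if p ≠ [] ∧ rest ≠ [] then
      pvMachine rest (out ++ [(true, String.ofList p)]) false
    else
      pvMachine rest (out ++ [(false, String.ofList ('_' :: p))]) true

theorem pvFoldB_eq (k : Int) (parts : List (List Char)) (t : Int)
    (out : List (Bool × String)) (under : Bool) (h : t + parts.length = k) :
    (List.foldl (pvStepB k) (out, under) (PySem.List.enumerate parts t)).1 =
      pvMachine parts out under := by
  induction parts generalizing t out under with
  | nil => simp [PySem.List.enumerate_nil, pvMachine]
  | cons p rest ih =>
    rw [PySem.List.enumerate_cons, List.foldl_cons]
    have hlt : (t + 1 < k) ↔ rest ≠ [] := by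
      simp only [List.length_cons] at h
      constructor
      · intro hl hnil; rw [hnil] at h; simp at h; omega
      · intro hne
        have : 0 < rest.length := List.length_pos_iff.mpr hne
        push_cast at h ⊢; omega
    have hnext : t + 1 + (rest.length : Int) = k := by
      simp only [List.length_cons] at h; push_cast at h ⊢; omega
    cases under with
    | false =>
      rw [pvMachine]
      by_cases hp : p ≠ []
      · rw [show pvStepB k (out, false) (t, p) =
            ((out ++ [(false, String.ofList p)]), true) from by simp [pvStepB, hp]]
        rw [if_pos hp, ih (t + 1) _ _ hnext]
      · rw [show pvStepB k (out, false) (t, p) = (out, true) from by simp [pvStepB, hp]]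
        rw [if_neg hp, ih (t + 1) _ _ hnext]
    | true =>
      rw [pvMachine]
      by_cases hc : p ≠ [] ∧ rest ≠ []
      · rw [show pvStepB k (out, true) (t, p) =
            ((out ++ [(true, String.ofList p)]), false) from by
          simp only [pvStepB]; rw [if_neg (by simp), if_pos ⟨hc.1, hlt.mpr hc.2⟩]]
        rw [if_pos hc, ih (t + 1) _ _ hnext]
      · rw [show pvStepB k (out, true) (t, p) =
            ((out ++ [(false, String.ofList ('_' :: p))]), true) from by
          simp only [pvStepB]
          rw [if_neg (by simp), if_neg (by
            intro hcon
            exact hc ⟨hcon.1, hlt.mp hcon.2⟩)]]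
        rw [if_neg hc, ih (t + 1) _ _ hnext]

theorem pvSplit_char_nil (s : List Char) (h : s.dropWhile (· ≠ '_') = []) :
    pvSplit s = [s.takeWhile (· ≠ '_')] := by
  rw [pvSplit_char, h]

theorem pvSplit_char_cons (s : List Char) (d : Char) (t2 : List Char)
    (h : s.dropWhile (· ≠ '_') = d :: t2) :
    pvSplit s = (s.takeWhile (· ≠ '_')) :: pvSplit t2 := by
  rw [pvSplit_char, h]

theorem pvPU (s : List Char) :
    (∀ out, pvMachine (pvSplit s) out false = out ++ pvF s) ∧
    (∀ out, pvMachine (pvSplit s) out true = out ++ pvF ('_' :: s)) := by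
  constructor
  · intro out
    cases hdw : s.dropWhile (· ≠ '_') with
    | nil =>
      have hall : ∀ x ∈ s, x ≠ '_' := by
        intro x hx
        have := List.dropWhile_eq_nil_iff.mp hdw x hx
        simpa using this
      have htw : s.takeWhile (· ≠ '_') = s :=
        List.takeWhile_eq_self_iff.mpr (by intro x hx; simpa using hall x hx)
      rw [pvSplit_char_nil s hdw, pvMachine, pvMachine, htw]
      cases s with
      | nil => simp [pvF]
      | cons c t =>
        have hc : c ≠ '_' := hall c (by simp)
        rw [if_pos (by simp)]
        conv_rhs => rw [pvF]
        rw [if_neg hc]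
        have ht2 : t.dropWhile (· ≠ '_') = [] := by
          rw [List.dropWhile_cons_of_pos (by simp [hc])] at hdw; exact hdw
        have ht3 : t.takeWhile (· ≠ '_') = t := by
          rw [List.takeWhile_cons_of_pos (by simp [hc])] at htw
          injection htw
        rw [ht2, ht3, pvF]
    | cons d t2 =>
      have hd : d = '_' := by
        have := pvHead_dropWhile _ s d t2 hdw; simpa using this
      subst hd
      have hlen : t2.length < s.length := by
        have := List.Sublist.length_le (List.dropWhile_sublist (l := s) (p := fun x => decide (x ≠ '_')))
        rw [hdw] at this; simp at this; omega
      rw [pvSplit_char_cons s '_' t2 hdw, pvMachine]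
      cases s with
      | nil => simp at hdw
      | cons c t =>
        by_cases hc : c = '_'
        · subst hc
          have ht2 : t = t2 := by
            rw [List.dropWhile_cons_of_neg (by simp)] at hdw
            injection hdw
          rw [List.takeWhile_cons_of_neg (by simp), if_neg (by simp), (pvPU t2).2 out, ht2]
        · rw [List.takeWhile_cons_of_pos (by simp [hc]), if_pos (by simp), (pvPU t2).2 _]
          conv_rhs => rw [pvF]
          rw [if_neg hc]
          have hdt : t.dropWhile (· ≠ '_') = '_' :: t2 := by
            rw [List.dropWhile_cons_of_pos (by simp [hc])] at hdw; exact hdw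
          rw [hdt]
          simp
  · intro out
    cases hdw : s.dropWhile (· ≠ '_') with
    | nil =>
      rw [pvSplit_char_nil s hdw, pvMachine,
        if_neg (by intro hcon; exact hcon.2 rfl), pvMachine]
      conv_rhs => rw [pvF]
      rw [if_pos rfl, if_neg (by intro hcon; exact hcon.1 hdw), hdw, pvF]
    | cons d t2 =>
      have hd : d = '_' := by
        have := pvHead_dropWhile _ s d t2 hdw; simpa using this
      subst hd
      have hlen : t2.length < s.length := by
        have := List.Sublist.length_le (List.dropWhile_sublist (l := s) (p := fun x => decide (x ≠ '_')))
        rw [hdw] at this; simp at this; omega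
      rw [pvSplit_char_cons s '_' t2 hdw, pvMachine]
      by_cases hin : s.takeWhile (· ≠ '_') ≠ []
      · rw [if_pos ⟨hin, pvSplit_ne_nil t2⟩, (pvPU t2).1 _]
        conv_rhs => rw [pvF]
        rw [if_pos rfl, if_pos ⟨by rw [hdw]; simp, hin⟩, hdw]
        simp
      · rw [if_neg (by intro hcon; exact hin hcon.1), (pvPU t2).2 _]
        rw [not_not] at hin
        rw [hin]
        conv_rhs => rw [pvF]
        rw [if_pos rfl, if_neg (by intro hcon; exact hcon.2 hin), hdw]
        have hin2 : List.takeWhile (fun x => !decide (x = '_')) s = [] := by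
          have hp : (fun x : Char => !decide (x = '_')) = (fun x => decide (x ≠ '_')) := by
            funext x; simp [decide_not]
          rw [hp, hin]
        simp [hin2]
termination_by s.length
decreasing_by all_goals omega

theorem pvA_eq_pvF (raw : String) :
    tagline_outer_italic_segments_py raw = pvF raw.toList := by
  rw [tagline_outer_italic_segments_py, pvLoopA_eq raw.toList 0 []]
  simp

theorem pvB_eq_pvF (raw : String) :
    tagline_outer_italic_segments_py_alt raw = pvF raw.toList := by
  rw [tagline_outer_italic_segments_py_alt]
  simp only [pvSplitOn_eq]
  rw [pvFoldB_eq ((pvSplit raw.toList).length : Int) (pvSplit raw.toList) 0 [] false (by omega)]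
  rw [(pvPU raw.toList).1 []]
  simp

-- ===== VERDICT (by name: the statement is the Claim_ definition above) =====
theorem tagline_outer_italic_segments_py_spec : Claim_equal_tagline_outer_italic_segments_py := by
  intro raw _
  unfold Spec_tagline_outer_italic_segments_py
  rw [pvA_eq_pvF, pvB_eq_pvF]
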